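-- pv_equiv track=rewrite | github.com/kosakkun/mm-tester | problems/VehicleRouting/sample/python/main.py | solve
-- ===== SOURCE A (Python) =====
-- def solve (N, M, depotX, depotY, x, y, cap, speed):
--     K = 0
--     T = []
--     L = []
--     D = []
--     while N > 0:
--         K = K + 1
--         T.append(0)
--         L.append(min(N, cap[0]))
--         Dt = []
--         for i in range(L[-1]):
--             N = N - 1
--             Dt.append(N)
--         D.append(Dt)
--     return K, T, L, D
-- ===== SOURCE B (Python) =====
-- def solve(N, M, depotX, depotY, x, y, cap, speed):
--     if N <= 0:
--         return 0, [], [], []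
--     c = cap[0]
--     K = -(-N // c)
--     T = [0] * K
--     L = [c] * (K - 1) + [N - (K - 1) * c]
--     D = [list(range(N - 1 - g * c, N - 1 - g * c - L[g], -1)) for g in range(K)]
--     return K, T, L, D
-- ===== Notes on version B (the rewrite author's own statement) =====
-- stated objective: simpler
-- what changed: A's decrementing while/for accumulation loops are replaced by closed-form arithmetic: group count by ceiling division, group sizes by list replication, and each delivery group emitted directly as a descending range slice.
import Mathlib
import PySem

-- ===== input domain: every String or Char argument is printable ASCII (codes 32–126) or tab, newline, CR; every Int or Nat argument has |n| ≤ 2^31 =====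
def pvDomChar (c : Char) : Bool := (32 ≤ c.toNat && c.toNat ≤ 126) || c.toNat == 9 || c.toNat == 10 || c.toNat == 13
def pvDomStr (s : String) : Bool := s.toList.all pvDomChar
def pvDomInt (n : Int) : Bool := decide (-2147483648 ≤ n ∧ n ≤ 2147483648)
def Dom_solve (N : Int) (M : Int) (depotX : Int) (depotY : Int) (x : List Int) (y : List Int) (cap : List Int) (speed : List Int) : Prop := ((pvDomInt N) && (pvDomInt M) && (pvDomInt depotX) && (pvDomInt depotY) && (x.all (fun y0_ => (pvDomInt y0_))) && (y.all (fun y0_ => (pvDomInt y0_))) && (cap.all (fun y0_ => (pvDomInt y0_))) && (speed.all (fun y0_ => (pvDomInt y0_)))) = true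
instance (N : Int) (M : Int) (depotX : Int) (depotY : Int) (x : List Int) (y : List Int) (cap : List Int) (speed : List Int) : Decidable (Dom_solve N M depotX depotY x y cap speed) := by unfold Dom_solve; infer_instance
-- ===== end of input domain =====

-- B replaces A's decrementing while/for accumulation by closed-form arithmetic (ceil-division group
-- count, replicated sizes, direct descending ranges); objective: simpler.

-- ===== PORT A =====
-- inner 'for i in range(L[-1]): N = N - 1; Dt.append(N)' (iteration count as a Nat; range(c) is empty for c ≤ 0)
def solveInner (n : Int) : Nat → Int × List Int
  | 0 => (n, [])
  | k + 1 =>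
    let n' := n - 1
    let p := solveInner n' k
    (p.1, n' :: p.2)

-- the while-loop; fuel = N.toNat bounds the iteration count (each pass removes ≥ 1 when cap[0] ≥ 1;
-- with cap[0] ≤ 0 < N the Python loops forever — excluded by Pre_solve)
def solveLoop (cap : List Int) : Nat → Int → Int → List Int → List Int → List (List Int) → Int × List Int × List Int × List (List Int)
  | 0, _, K, T, L, D => (K, T, L, D)
  | fuel + 1, N, K, T, L, D =>
    if N > 0 then
      let c := min N ((PySem.List.pyGet? cap 0).getD 0)
      let p := solveInner N c.toNat
      solveLoop cap fuel p.1 (K + 1) (T ++ [0]) (L ++ [c]) (D ++ [p.2])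
    else (K, T, L, D)

def solve (N : Int) (M : Int) (depotX : Int) (depotY : Int) (x : List Int) (y : List Int) (cap : List Int) (speed : List Int) : Int × List Int × List Int × List (List Int) :=
  solveLoop cap N.toNat N 0 [] [] []

-- ===== PORT B =====
def solve_alt (N : Int) (M : Int) (depotX : Int) (depotY : Int) (x : List Int) (y : List Int) (cap : List Int) (speed : List Int) : Int × List Int × List Int × List (List Int) :=
  if N ≤ 0 then (0, [], [], [])
  else
    let c := (PySem.List.pyGet? cap 0).getD 0
    let K := -(PySem.Int.floordiv (-N) c)
    let T := List.replicate K.toNat (0 : Int)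
    let L := List.replicate (K - 1).toNat c ++ [N - (K - 1) * c]
    let D := (PySem.List.pyRange 0 K 1).map
      (fun g => PySem.List.pyRange (N - 1 - g * c) (N - 1 - g * c - ((PySem.List.pyGet? L g).getD 0)) (-1))
    (K, T, L, D)

-- ===== PRECONDITION & SPEC =====
-- Pre_ excludes only inputs where A returns no value: N > 0 with cap empty (IndexError on cap[0])
-- or with cap[0] ≤ 0 (A's while-loop never terminates).
def Pre_solve (N : Int) (M : Int) (depotX : Int) (depotY : Int) (x : List Int) (y : List Int) (cap : List Int) (speed : List Int) : Prop :=
  N ≤ 0 ∨ (cap ≠ [] ∧ 1 ≤ cap.headD 0)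
instance (N : Int) (M : Int) (depotX : Int) (depotY : Int) (x : List Int) (y : List Int) (cap : List Int) (speed : List Int) : Decidable (Pre_solve N M depotX depotY x y cap speed) := by unfold Pre_solve; infer_instance
def pvWitness_solve : Int × Int × Int × Int × List Int × List Int × List Int × List Int := (5, 1, 0, 0, [1, 2], [3, 4], [2], [1])

def Spec_solve (N : Int) (M : Int) (depotX : Int) (depotY : Int) (x : List Int) (y : List Int) (cap : List Int) (speed : List Int) (out : Int × List Int × List Int × List (List Int)) : Prop := out = solve_alt N M depotX depotY x y cap speed
instance (N : Int) (M : Int) (depotX : Int) (depotY : Int) (x : List Int) (y : List Int) (cap : List Int) (speed : List Int) (out : Int × List Int × List Int × List (List Int)) : Decidable (Spec_solve N M depotX depotY x y cap speed out) := by unfold Spec_solve; infer_instance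

-- ===== CLAIM (what is proved, stated in full; the proofs are below) =====
def Claim_equal_solve : Prop := ∀ (N : Int) (M : Int) (depotX : Int) (depotY : Int) (x : List Int) (y : List Int) (cap : List Int) (speed : List Int), Dom_solve N M depotX depotY x y cap speed → Pre_solve N M depotX depotY x y cap speed → Spec_solve N M depotX depotY x y cap speed (solve N M depotX depotY x y cap speed)

-- ===== LEMMAS AND PROOFS =====

-- closed forms computed by solve_alt, named for the proofs
def kf (N c : Int) : Int := -(PySem.Int.floordiv (-N) c)
def lf (N c : Int) : List Int := List.replicate (kf N c - 1).toNat c ++ [N - (kf N c - 1) * c]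
def df (N c : Int) : List (List Int) :=
  (PySem.List.pyRange 0 (kf N c) 1).map
    (fun g => PySem.List.pyRange (N - 1 - g * c) (N - 1 - g * c - ((PySem.List.pyGet? (lf N c) g).getD 0)) (-1))

lemma solve_alt_eq (N M depotX depotY : Int) (x y cap speed : List Int) (hN : ¬ N ≤ 0) :
    solve_alt N M depotX depotY x y cap speed =
      (kf N ((PySem.List.pyGet? cap 0).getD 0),
       List.replicate (kf N ((PySem.List.pyGet? cap 0).getD 0)).toNat 0,
       lf N ((PySem.List.pyGet? cap 0).getD 0),
       df N ((PySem.List.pyGet? cap 0).getD 0)) := by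
  simp [solve_alt, hN, kf, lf, df]

lemma kf_bounds (N c : Int) (hc : 0 < c) : (kf N c - 1) * c < N ∧ N ≤ kf N c * c := by
  have h := (PySem.Int.neg_floordiv_neg_eq_iff_of_pos (a := N) (b := c) (q := kf N c) hc).mp rfl
  exact h

lemma kf_pos (N c : Int) (hc : 0 < c) (hN : 0 < N) : 1 ≤ kf N c := by
  obtain ⟨h1, h2⟩ := kf_bounds N c hc
  nlinarith

lemma kf_one (N c : Int) (hc : 0 < c) (hN : 0 < N) (hNc : N ≤ c) : kf N c = 1 := by
  exact (PySem.Int.neg_floordiv_neg_eq_iff_of_pos hc).mpr (by constructor <;> nlinarith)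

lemma kf_succ (N c : Int) (hc : 0 < c) (hNc : c < N) : kf N c = kf (N - c) c + 1 := by
  have h0 : 0 < N - c := by omega
  obtain ⟨h1, h2⟩ := kf_bounds (N - c) c hc
  exact (PySem.Int.neg_floordiv_neg_eq_iff_of_pos hc).mpr (by constructor <;> nlinarith)

lemma lf_succ (N c : Int) (hc : 0 < c) (hNc : c < N) : lf N c = c :: lf (N - c) c := by
  have hk := kf_succ N c hc hNc
  have hk1 := kf_pos (N - c) c hc (by omega)
  unfold lf
  rw [hk]
  have : (kf (N - c) c + 1 - 1).toNat = (kf (N - c) c - 1).toNat + 1 := by omega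
  rw [this, List.replicate_succ]
  simp only [List.cons_append, List.cons.injEq, List.append_cancel_left_eq, true_and, and_true]
  ring_nf

lemma innerA_eq (k : Nat) : ∀ n : Int, solveInner n k = (n - k, PySem.List.pyRange (n - 1) (n - 1 - k) (-1)) := by
  induction k with
  | zero =>
    intro n
    simp only [solveInner, Nat.cast_zero, sub_zero]
    rw [PySem.List.pyRange_neg_one_eq_nil (le_refl _)]
  | succ k ih =>
    intro n
    simp only [solveInner, ih (n - 1)]
    conv_rhs => rw [PySem.List.pyRange_neg_one_cons (by push_cast; omega)]
    refine Prod.ext ?_ ?_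
    · push_cast; ring
    · show (n - 1) :: PySem.List.pyRange (n - 1 - 1) (n - 1 - 1 - (k : Int)) (-1) = _
      congr 2
      push_cast; ring

lemma df_one (N c : Int) (hc : 0 < c) (hN : 0 < N) (hNc : N ≤ c) :
    df N c = [PySem.List.pyRange (N - 1) (N - 1 - N) (-1)] := by
  unfold df lf
  rw [kf_one N c hc hN hNc]
  have h01 : PySem.List.pyRange 0 1 1 = [0] := by decide
  rw [h01]
  simp only [List.map_cons, List.map_nil]
  norm_num [PySem.List.pyGet?_zero_cons]

lemma df_succ (N c : Int) (hc : 0 < c) (hNc : c < N) :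
    df N c = PySem.List.pyRange (N - 1) (N - 1 - c) (-1) :: df (N - c) c := by
  have hk := kf_succ N c hc hNc
  have hk1 := kf_pos (N - c) c hc (by omega)
  have hlf := lf_succ N c hc hNc
  unfold df
  rw [hk, hlf]
  rw [PySem.List.pyRange_one, PySem.List.pyRange_one]
  have htn : (kf (N - c) c + 1 - 0).toNat = (kf (N - c) c - 0).toNat + 1 := by omega
  rw [htn, List.range_succ_eq_map]
  simp only [List.map_cons, List.map_map, List.cons.injEq]
  constructor
  · norm_num [PySem.List.pyGet?_zero_cons]
  · refine List.map_congr_left fun a ha => ?_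
    simp only [Function.comp_apply]
    push_cast
    simp only [PySem.List.pyGet?_natCast, zero_add]
    rw [PySem.List.pyGet?_cons_succ, PySem.List.pyGet?_natCast]
    congr 1 <;> ring

lemma loop_zero (cap : List Int) (f : Nat) (K : Int) (T L : List Int) (D : List (List Int)) :
    solveLoop cap f 0 K T L D = (K, T, L, D) := by
  cases f <;> simp [solveLoop]

lemma loop_eq (c : Int) (hc : 1 ≤ c) : ∀ n : Nat, ∀ N : Int, N.toNat ≤ n → 0 < N →
    ∀ (cap : List Int), (PySem.List.pyGet? cap 0).getD 0 = c → ∀ fuel, N.toNat ≤ fuel →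
    ∀ (K : Int) (T L : List Int) (D : List (List Int)),
    solveLoop cap fuel N K T L D =
      (K + kf N c, T ++ List.replicate (kf N c).toNat 0, L ++ lf N c, D ++ df N c) := by
  intro n
  induction n with
  | zero => intro N hn hN; omega
  | succ n ih =>
    intro N hn hN cap hcap fuel hfuel K T L D
    cases fuel with
    | zero => omega
    | succ fuel' =>
    simp only [solveLoop, if_pos hN, hcap]
    by_cases hNc : N ≤ c
    · have hmin : min N c = N := by omega
      rw [hmin, innerA_eq]
      have hNt : ((N.toNat : Int)) = N := by omega
      rw [hNt]
      simp only [sub_self]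
      rw [loop_zero]
      rw [kf_one N c (by omega) hN hNc, df_one N c (by omega) hN hNc]
      unfold lf
      rw [kf_one N c (by omega) hN hNc]
      norm_num
    · push_neg at hNc
      have hmin : min N c = c := by omega
      rw [hmin, innerA_eq]
      have hct : ((c.toNat : Int)) = c := by omega
      rw [hct]
      rw [ih (N - c) (by omega) (by omega) cap hcap fuel' (by omega)]
      rw [kf_succ N c (by omega) hNc, lf_succ N c (by omega) hNc, df_succ N c (by omega) hNc]
      have hk1 := kf_pos (N - c) c (by omega) (by omega)
      have htn : (kf (N - c) c + 1).toNat = (kf (N - c) c).toNat + 1 := by omega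
      rw [htn, List.replicate_succ]
      simp [List.append_assoc]
      ring

-- ===== VERDICT (by name: the statement is the Claim_ definition above) =====
theorem solve_spec : Claim_equal_solve := by
  intro N M depotX depotY x y cap speed _ hpre
  unfold Spec_solve solve
  by_cases hN : N ≤ 0
  · have h0 : N.toNat = 0 := by omega
    rw [h0]
    simp [solveLoop, solve_alt, hN]
  · rcases hpre with h | ⟨hne, hc⟩
    · omega
    · obtain ⟨c0, rest, rfl⟩ : ∃ c0 rest, cap = c0 :: rest := by
        cases cap with
        | nil => exact absurd rfl hne
        | cons a l => exact ⟨a, l, rfl⟩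
      have hget : (PySem.List.pyGet? (c0 :: rest) 0).getD 0 = c0 := by
        simp [PySem.List.pyGet?_zero_cons]
      have hc0 : 1 ≤ c0 := by simpa using hc
      rw [loop_eq c0 hc0 N.toNat N le_rfl (by omega) _ hget N.toNat le_rfl]
      rw [solve_alt_eq _ _ _ _ _ _ _ _ hN, hget]
      simp
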